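-- pv_equiv track=rewrite | github.com/rakasan/py_scripting | alphabet_soup/main.py | alphabetSoup_2
-- ===== SOURCE A (Python) =====
-- def alphabetSoup_2(string):
--     li = sorted(list(string))
--     lowerLi = sorted(list(string.lower()))
--     caps = []
--     new_string = ''
--     for char in li:
--         if char.isupper():
--             caps.append(char)
--     for letter in lowerLi:
--         if caps.count(letter.upper())!= 0:
--             new_string += letter.upper()
--             caps.pop(caps.index(letter.upper()))
--         else:
--             new_string += letter
--     return new_string
-- ===== SOURCE B (Python) =====
-- def alphabetSoup_2(string):
--     caps = {}
--     for ch in string: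
--         if ch.isupper():
--             caps[ch] = caps.get(ch, 0) + 1
--     counts = {}
--     for ch in string.lower():
--         counts[ch] = counts.get(ch, 0) + 1
--     parts = []
--     for l in sorted(counts):
--         n = counts[l]
--         u = min(n, caps.get(l.upper(), 0))
--         if u != 0:
--             caps[l.upper()] = caps.get(l.upper(), 0) - u
--         parts.append(l.upper() * u + l * (n - u))
--     return ''.join(parts)
-- ===== Notes on version B (the rewrite author's own statement) =====
-- stated objective: faster
-- what changed: Replaces A's per-character loop that scans the caps list three times (count, index, pop) for every letter by counters built in one pass plus one run-length chunk emitted per distinct sorted letter.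
import Mathlib
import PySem

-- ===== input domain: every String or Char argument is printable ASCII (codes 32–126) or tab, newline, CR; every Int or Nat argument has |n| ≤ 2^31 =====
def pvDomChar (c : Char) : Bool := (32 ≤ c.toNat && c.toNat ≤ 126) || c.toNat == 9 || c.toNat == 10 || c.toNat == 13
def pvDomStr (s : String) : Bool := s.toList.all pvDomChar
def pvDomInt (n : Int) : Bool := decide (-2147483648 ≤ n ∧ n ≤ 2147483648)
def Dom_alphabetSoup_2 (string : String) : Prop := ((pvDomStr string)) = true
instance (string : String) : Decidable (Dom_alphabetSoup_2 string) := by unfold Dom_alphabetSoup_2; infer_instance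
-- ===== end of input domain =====

-- B replaces A's per-character scan-and-pop over a caps list by one pass per distinct
-- letter: counters built once, then run-length chunks emitted per sorted distinct letter
-- (objective: faster — removes the quadratic count/index/pop scans).

-- ===== PORT A =====
-- A-side helpers: the two loop bodies of A, as named steps
def pvCapsStep (caps : List Char) (char : Char) : List Char :=
  if PySem.Chars.isupper char then caps ++ [char] else caps

def pvStepA (st : List Char × List Char) (letter : Char) : List Char × List Char :=
  if PySem.List.count st.1 (PySem.Chars.upperChar letter) ≠ 0 then
    -- caps.pop(caps.index(letter.upper())): index then pop (both guarded by count ≠ 0)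
    match PySem.List.index? st.1 (PySem.Chars.upperChar letter) with
    | some i =>
      match PySem.List.pop? st.1 (i : Int) with
      | some (_, caps') => (caps', st.2 ++ [PySem.Chars.upperChar letter])
      | none => (st.1, st.2 ++ [PySem.Chars.upperChar letter])   -- unreachable (i in range)
    | none => (st.1, st.2 ++ [PySem.Chars.upperChar letter])     -- unreachable (count ≠ 0)
  else (st.1, st.2 ++ [letter])

def alphabetSoup_2 (string : String) : String :=
  let li := PySem.List.sorted string.toList (fun c => c)
  let lowerLi := PySem.List.sorted (PySem.Str.lower string).toList (fun c => c)
  let caps := li.foldl pvCapsStep []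
  let res := lowerLi.foldl pvStepA (caps, [])
  String.ofList res.2

-- ===== PORT B =====
-- B-side helper: the body of B's loop over the sorted distinct lowered letters
def pvStepB (counts : PySem.Dict Char Int) (st : PySem.Dict Char Int × List (List Char)) (l : Char) :
    PySem.Dict Char Int × List (List Char) :=
  let n := counts.getD l 0
  let L := PySem.Chars.upperChar l
  let u := min n (st.1.getD L 0)
  let caps' := if u ≠ 0 then st.1.insert L (st.1.getD L 0 - u) else st.1
  (caps', st.2 ++ [PySem.List.pyRepeat [L] u ++ PySem.List.pyRepeat [l] (n - u)])

def alphabetSoup_2_alt (string : String) : String :=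
  let caps := string.toList.foldl
    (fun d ch => if PySem.Chars.isupper ch then d.insert ch (d.getD ch 0 + 1) else d)
    PySem.Dict.empty
  let counts := (PySem.Str.lower string).toList.foldl
    (fun d ch => d.insert ch (d.getD ch 0 + 1)) PySem.Dict.empty
  let res := (PySem.List.sorted counts.keys (fun c => c)).foldl (pvStepB counts) (caps, [])
  String.ofList (PySem.Chars.join [] res.2)

-- ===== PRECONDITION & SPEC =====
def Spec_alphabetSoup_2 (string : String) (out : String) : Prop := out = alphabetSoup_2_alt string
instance (string : String) (out : String) : Decidable (Spec_alphabetSoup_2 string out) := by unfold Spec_alphabetSoup_2; infer_instance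

-- ===== CLAIM (what is proved, stated in full; the proofs are below) =====
def Claim_equal_alphabetSoup_2 : Prop := ∀ (string : String), Dom_alphabetSoup_2 string → Spec_alphabetSoup_2 string (alphabetSoup_2 string)

-- ===== LEMMAS AND PROOFS =====

-- erase k occurrences of x (abstract description of A's repeated pops)
def pvEraseN (xs : List α) [BEq α] (x : α) : Nat → List α
  | 0 => xs
  | k + 1 => pvEraseN (xs.erase x) x k

-- A's caps-building loop is a filter
theorem pvCaps_eq (l : List Char) (init : List Char) :
    l.foldl pvCapsStep init = init ++ l.filter PySem.Chars.isupper := by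
  induction l generalizing init with
  | nil => simp
  | cons c t ih =>
    by_cases h : PySem.Chars.isupper c <;>
      simp [pvCapsStep, h, ih]

-- A's inner step, in terms of count and erase
theorem pvStepA_eq (caps acc : List Char) (letter : Char) :
    pvStepA (caps, acc) letter =
      if caps.count (PySem.Chars.upperChar letter) ≠ 0 then
        (caps.erase (PySem.Chars.upperChar letter), acc ++ [PySem.Chars.upperChar letter])
      else (caps, acc ++ [letter]) := by
  by_cases h : List.count (PySem.Chars.upperChar letter) caps = 0
  · simp [pvStepA, PySem.List.count_eq, h]
  · have hmem : PySem.Chars.upperChar letter ∈ caps := by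
      by_contra hm; exact h (List.count_eq_zero.mpr hm)
    obtain ⟨k, hk⟩ := Option.isSome_iff_exists.mp
      ((PySem.List.index?_isSome_iff caps _).mpr hmem)
    obtain ⟨pre, suf, hsplit, hlen, hnot⟩ := (PySem.List.index?_eq_some_iff _ _ _).mp hk
    have hlt : k < caps.length := by subst hsplit; simp [← hlen]
    have hIdx : ∀ (pre suf : List Char) (c : Char),
        (pre ++ c :: suf).eraseIdx pre.length = pre ++ suf := by
      intro pre
      induction pre with
      | nil => intro suf c; simp
      | cons p t ih => intro suf c; simpa [List.eraseIdx] using ih suf c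
    have herase : caps.eraseIdx k = caps.erase (PySem.Chars.upperChar letter) := by
      subst hsplit
      rw [List.erase_append_right _ hnot, List.erase_cons_head, ← hlen, hIdx]
    rw [pvStepA]
    simp only [PySem.List.count_eq, if_pos (by simpa using h), hk]
    rw [PySem.List.pop?_natCast _ _ hlt]
    simp [herase]

theorem pvCount_eraseN (xs : List Char) (x : Char) (k : Nat) (h : k ≤ xs.count x) (y : Char) :
    (pvEraseN xs x k).count y = xs.count y - (if y = x then k else 0) := by
  induction k generalizing xs with
  | zero => simp [pvEraseN]
  | succ k ih =>
    have hx : 0 < xs.count x := by omega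
    rw [pvEraseN, ih _ (by rw [List.count_erase_self]; omega)]
    by_cases hy : y = x
    · subst hy; rw [List.count_erase_self]; simp; omega
    · rw [List.count_erase_of_ne hy]; simp [hy]

-- A's loop over a constant run of letters
theorem pvRunA (l : Char) (n : Nat) : ∀ (caps acc : List Char),
    (List.replicate n l).foldl pvStepA (caps, acc) =
      (pvEraseN caps (PySem.Chars.upperChar l) (min n (caps.count (PySem.Chars.upperChar l))),
       acc ++ List.replicate (min n (caps.count (PySem.Chars.upperChar l))) (PySem.Chars.upperChar l)
           ++ List.replicate (n - min n (caps.count (PySem.Chars.upperChar l))) l) := by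
  induction n with
  | zero => intro caps acc; simp [pvEraseN]
  | succ n ih =>
    intro caps acc
    rw [List.replicate_succ, List.foldl_cons, pvStepA_eq]
    by_cases h : caps.count (PySem.Chars.upperChar l) = 0
    · rw [if_neg (by simpa using h), ih]
      simp [h, pvEraseN, List.replicate_succ]
    · rw [if_pos (by simpa using h), ih]
      have hcnt : (caps.erase (PySem.Chars.upperChar l)).count (PySem.Chars.upperChar l)
          = caps.count (PySem.Chars.upperChar l) - 1 := List.count_erase_self
      have h1 : min (n + 1) (caps.count (PySem.Chars.upperChar l))
          = min n ((caps.erase (PySem.Chars.upperChar l)).count (PySem.Chars.upperChar l)) + 1 := by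
        rw [hcnt]; omega
      have h2 : n + 1 - (min n ((caps.erase (PySem.Chars.upperChar l)).count (PySem.Chars.upperChar l)) + 1)
          = n - min n ((caps.erase (PySem.Chars.upperChar l)).count (PySem.Chars.upperChar l)) := by
        omega
      rw [h1, h2, List.replicate_succ]
      simp [pvEraseN]

theorem pvRepeat_singleton (c : Char) (n : Int) :
    PySem.List.pyRepeat [c] n = List.replicate n.toNat c := by
  simp [PySem.List.pyRepeat]

theorem pvJoin_nil (l : List (List Char)) : PySem.Chars.join [] l = l.flatten := by
  induction l with
  | nil => rfl
  | cons x t ih =>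
    cases t with
    | nil => simp [PySem.Chars.join, List.intercalate]
    | cons y u =>
      simp only [PySem.Chars.join, List.intercalate] at *
      simp only [List.intersperse_cons₂, List.flatten_cons, List.nil_append] at *
      simp [ih]

-- counts of the flatMap of replicates
theorem pvCountFlat (xs : List Char) (ks : List Char) (hnd : ks.Nodup) (c : Char) :
    (ks.flatMap (fun l => List.replicate (xs.count l) l)).count c
      = if c ∈ ks then xs.count c else 0 := by
  induction ks with
  | nil => simp
  | cons k t ih =>
    simp only [List.flatMap_cons, List.count_append, List.count_replicate,
      List.nodup_cons] at *
    rcases hnd with ⟨hk, hnd⟩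
    rw [ih hnd]
    by_cases hc : c = k
    · subst hc; simp [hk]
    · simp [hc, Ne.symm hc]

theorem pvPairFlat (ks : List Char) (m : Char → Nat) (h : ks.Pairwise (· < ·)) :
    (ks.flatMap (fun l => List.replicate (m l) l)).Pairwise (· ≤ ·) := by
  induction ks with
  | nil => simp
  | cons k t ih =>
    rcases List.pairwise_cons.mp h with ⟨hk, ht⟩
    simp only [List.flatMap_cons]
    rw [List.pairwise_append]
    refine ⟨List.pairwise_replicate.mpr (Or.inr le_rfl), ih ht, ?_⟩
    intro a ha b hb
    rcases List.eq_of_mem_replicate ha with rfl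
    rcases List.mem_flatMap.mp hb with ⟨l', hl', hb'⟩
    rcases List.eq_of_mem_replicate hb' with rfl
    exact le_of_lt (hk _ hl')

-- a sorted list is the concatenation of its runs, one per distinct element
theorem pvSortedFlat (xs : List Char) :
    PySem.List.sorted xs (fun c => c)
      = (PySem.List.sorted (PySem.Set.ofList xs) (fun c => c)).flatMap
          (fun l => List.replicate (xs.count l) l) := by
  apply PySem.List.sorted_id_eq_of_perm_of_pairwise
  · have hnd : (PySem.List.sorted (PySem.Set.ofList xs) (fun c => c)).Nodup :=
      (PySem.List.sorted_perm _ _ _).symm.nodup (PySem.Set.nodup_ofList xs)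
    rw [List.perm_iff_count]
    intro c
    rw [pvCountFlat xs _ hnd c]
    by_cases hc : c ∈ xs
    · simp [PySem.List.mem_sorted, PySem.Set.mem_ofList, hc]
    · simp [PySem.List.mem_sorted, PySem.Set.mem_ofList, hc, List.count_eq_zero.mpr hc]
  · exact pvPairFlat _ _ (PySem.List.sorted_ofList_pairwise_lt xs)

-- the parallel run: A's loop over the runs equals B's loop over the distinct letters
theorem pvPar (counts : PySem.Dict Char Int) (ks : List Char) :
    ∀ (xs : List Char) (d : PySem.Dict Char Int) (parts : List (List Char)),
    (∀ L, (xs.count L : Int) = d.getD L 0) →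
    (∀ l ∈ ks, 0 ≤ counts.getD l 0) →
    ((ks.flatMap (fun l => List.replicate (counts.getD l 0).toNat l)).foldl pvStepA
        (xs, parts.flatten)).2
      = ((ks.foldl (pvStepB counts) (d, parts)).2).flatten := by
  induction ks with
  | nil => intro xs d parts _ _; simp
  | cons l t ih =>
    intro xs d parts hinv hn
    have hnl : 0 ≤ counts.getD l 0 := hn l (by simp)
    simp only [List.flatMap_cons, List.foldl_append, List.foldl_cons]
    rw [pvRunA]
    have hU := hinv (PySem.Chars.upperChar l)
    set U := PySem.Chars.upperChar l with hUdef
    set n := counts.getD l 0 with hndef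
    set cnt := xs.count U with hcnt
    set u := min n (d.getD U 0) with hu
    have huval : u = min n (cnt : Int) := by rw [hu, ← hU]
    have huA : min n.toNat cnt = u.toNat := by omega
    have huB : n.toNat - min n.toNat cnt = (n - u).toNat := by omega
    have hle : min n.toNat cnt ≤ xs.count U := by omega
    have hinv' : ∀ L, (((pvEraseN xs U (min n.toNat cnt)).count L : Int)
        = (pvStepB counts (d, parts) l).1.getD L 0) := by
      intro L
      rw [pvCount_eraseN xs U _ hle L]
      show _ = (if u ≠ 0 then d.insert U (d.getD U 0 - u) else d).getD L 0
      by_cases h0 : u = 0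
      · have hmin : min n.toNat cnt = 0 := by omega
        have hd : (if u ≠ 0 then d.insert U (d.getD U 0 - u) else d) = d := by simp [h0]
        rw [hd, ← hinv L]
        split <;> omega
      · rw [if_pos h0]
        by_cases hL : L = U
        · subst hL
          rw [PySem.Dict.getD_insert_self, if_pos rfl, ← hU]
          omega
        · rw [PySem.Dict.getD_insert_of_ne _ _ _ hL, if_neg hL, ← hinv L]
          omega
    have hstep2 : (pvStepB counts (d, parts) l).2
        = parts ++ [List.replicate u.toNat U ++ List.replicate (n - u).toNat l] := by
      show parts ++ [PySem.List.pyRepeat [U] u ++ PySem.List.pyRepeat [l] (n - u)] = _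
      rw [pvRepeat_singleton, pvRepeat_singleton]
    have hacc : parts.flatten
          ++ List.replicate (min n.toNat cnt) U
          ++ List.replicate (n.toNat - min n.toNat cnt) l
        = (parts ++ [List.replicate u.toNat U ++ List.replicate (n - u).toNat l]).flatten := by
      rw [huA]
      have huB2 : n.toNat - u.toNat = (n - u).toNat := by omega
      rw [huB2]; simp
    rw [hacc, ← hstep2]
    exact ih _ _ _ hinv' (fun x hx => hn x (by simp [hx]))

-- ===== VERDICT (by name: the statement is the Claim_ definition above) =====
theorem alphabetSoup_2_spec : Claim_equal_alphabetSoup_2 := by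
  intro string _
  unfold Spec_alphabetSoup_2 alphabetSoup_2 alphabetSoup_2_alt
  simp only [PySem.Str.toList_lower, PySem.Dict.foldl_insert_getD_add_one_eq_counter]
  set t := string.toList with ht
  set low := PySem.Chars.lower t with hlow
  congr 1
  rw [pvJoin_nil, PySem.Dict.keys_counter]
  have hcapsA : (PySem.List.sorted t (fun c => c)).foldl pvCapsStep []
      = (PySem.List.sorted t (fun c => c)).filter PySem.Chars.isupper := by
    rw [pvCaps_eq]; simp
  have hinv0 : ∀ L, ((((PySem.List.sorted t (fun c => c)).foldl pvCapsStep []).count L : Int)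
      = (t.foldl (fun d ch => if PySem.Chars.isupper ch then d.insert ch (d.getD ch 0 + 1) else d)
          PySem.Dict.empty).getD L 0) := by
    intro L
    rw [hcapsA, ← List.foldl_filter, PySem.Dict.getD_foldl_insert_add_one,
      PySem.Dict.getD_empty,
      ((PySem.List.sorted_perm t (fun c => c) false).filter PySem.Chars.isupper).count_eq L]
    simp
  have hflat : PySem.List.sorted low (fun c => c)
      = (PySem.List.sorted (PySem.Set.ofList low) (fun c => c)).flatMap
          (fun l => List.replicate ((PySem.Dict.counter low).getD l 0).toNat l) := by
    rw [pvSortedFlat low]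
    apply List.flatMap_congr
    intro l _
    rw [PySem.Dict.getD_counter]
    simp
  rw [hflat]
  have := pvPar (PySem.Dict.counter low)
    (PySem.List.sorted (PySem.Set.ofList low) (fun c => c))
    ((PySem.List.sorted t (fun c => c)).foldl pvCapsStep [])
    (t.foldl (fun d ch => if PySem.Chars.isupper ch then d.insert ch (d.getD ch 0 + 1) else d)
        PySem.Dict.empty)
    [] hinv0 (fun l _ => by rw [PySem.Dict.getD_counter]; positivity)
  simpa using this
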